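-- pv_equiv track=rewrite | github.com/PingPingE/Algorithm | Codility/FrogRiverOne.py | solution
-- ===== SOURCE A (Python) =====
-- def solution(X, A):
--     done_set = set()
--     done_N = len(done_set)
--
--     for e, a in enumerate(A):
--         if a not in done_set:
--             done_set.add(a)
--             done_N += 1
--             if done_N == X:
--                 return e
--     return -1
-- ===== SOURCE B (Python) =====
-- def solution(X, A):
--     first = {}
--     for i, a in enumerate(A):
--         if a not in first:
--             first[a] = i
--     firsts = sorted(first.values())
--     return firsts[X - 1] if 1 <= X <= len(firsts) else -1
-- ===== Notes on version B (the rewrite author's own statement) =====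
-- stated objective: alternative
-- what changed: Replaces the early-stopping scan with a mutable set and running counter by building a dict of each value's first-occurrence index, sorting those indices, and selecting the X-th one (with -1 when X is out of range).
import Mathlib
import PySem

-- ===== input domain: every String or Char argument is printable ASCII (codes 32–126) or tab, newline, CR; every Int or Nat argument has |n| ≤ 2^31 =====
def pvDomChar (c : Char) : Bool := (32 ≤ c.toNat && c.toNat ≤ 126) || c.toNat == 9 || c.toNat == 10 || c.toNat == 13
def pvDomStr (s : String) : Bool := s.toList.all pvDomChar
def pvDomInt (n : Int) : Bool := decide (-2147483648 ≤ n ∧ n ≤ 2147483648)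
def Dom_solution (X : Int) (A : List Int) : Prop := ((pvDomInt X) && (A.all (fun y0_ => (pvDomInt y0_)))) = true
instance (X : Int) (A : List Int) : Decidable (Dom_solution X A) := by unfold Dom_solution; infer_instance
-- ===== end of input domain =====

-- B re-implements A by a different decomposition: it builds a dict of first-occurrence
-- indices, sorts those indices and selects the X-th one, instead of A's early-stopping
-- scan with a mutable set and running counter.

-- ===== PORT A =====
def solLoop (X : Int) : List (Int × Int) → PySem.Set Int → Int → Int
  | [], _done_set, _done_N => -1
  | (e, a) :: rest, done_set, done_N =>
    if a ∈ done_set then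
      solLoop X rest done_set done_N
    else
      let done_set' := PySem.Set.add done_set a
      let done_N' := done_N + 1
      if done_N' = X then e else solLoop X rest done_set' done_N'

def solution (X : Int) (A : List Int) : Int :=
  solLoop X (PySem.List.enumerate A) (PySem.Set.empty) ((List.length (PySem.Set.empty : PySem.Set Int) : Int))

-- ===== PORT B =====
def solution_alt (X : Int) (A : List Int) : Int :=
  let first : PySem.Dict Int Int :=
    (PySem.List.enumerate A).foldl
      (fun d p => if d.contains p.2 then d else d.insert p.2 p.1) PySem.Dict.empty
  let firsts : List Int := PySem.List.sorted first.values (fun x => x) false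
  if 1 ≤ X ∧ X ≤ (firsts.length : Int) then
    -- the match totalises the in-range indexing firsts[X-1] (always `some` under the guard)
    match PySem.List.pyGet? firsts (X - 1) with
    | some v => v
    | none => -1
  else -1

-- ===== PRECONDITION & SPEC =====
def Spec_solution (X : Int) (A : List Int) (out : Int) : Prop := out = solution_alt X A
instance (X : Int) (A : List Int) (out : Int) : Decidable (Spec_solution X A out) := by unfold Spec_solution; infer_instance

-- ===== CLAIM (what is proved, stated in full; the proofs are below) =====
def Claim_equal_solution : Prop := ∀ (X : Int) (A : List Int), Dom_solution X A → Spec_solution X A (solution X A)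

-- ===== LEMMAS AND PROOFS =====

-- first-occurrence indices of `rest`, given the already-seen prefix `pre`, counting from i
def firstsAux (pre : List Int) (i : Int) : List Int → List Int
  | [] => []
  | a :: r =>
    if a ∈ pre then firstsAux (pre ++ [a]) (i + 1) r
    else i :: firstsAux (pre ++ [a]) (i + 1) r

-- 1-based selection with -1 default (what B does with its X)
def sel (l : List Int) (m : Int) : Int :=
  if 1 ≤ m ∧ m ≤ (l.length : Int) then (PySem.List.pyGet? l (m - 1)).getD (-1) else -1

theorem sel_nil (m : Int) : sel [] m = -1 := by
  simp only [sel, List.length_nil]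
  split <;> [omega; rfl]

theorem sel_cons_one (x : Int) (l : List Int) : sel (x :: l) 1 = x := by
  simp only [sel, List.length_cons]
  rw [if_pos ⟨le_refl 1, by push_cast; omega⟩]
  norm_num [PySem.List.pyGet?_zero_cons]

theorem sel_cons_ne (x : Int) (l : List Int) (m : Int) (hm : m ≠ 1) :
    sel (x :: l) m = sel l (m - 1) := by
  simp only [sel, List.length_cons]
  by_cases h2 : 2 ≤ m ∧ m ≤ (l.length : Int) + 1
  · rw [if_pos (by push_cast at h2 ⊢; omega), if_pos (by omega)]
    rw [PySem.List.pyGet?_of_nonneg (x :: l) (by omega), PySem.List.pyGet?_of_nonneg l (by omega)]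
    have ht : (m - 1).toNat = (m - 2).toNat + 1 := by omega
    have ht2 : (m - 1 - 1).toNat = (m - 2).toNat := by omega
    rw [ht, ht2, List.getElem?_cons_succ]
  · rw [if_neg (by push_cast; omega), if_neg (by omega)]

theorem lemA : ∀ (rest pre : List Int) (s : PySem.Set Int) (n X i : Int),
    (∀ x : Int, x ∈ s ↔ x ∈ pre) →
    solLoop X (PySem.List.enumerate rest i) s n = sel (firstsAux pre i rest) (X - n) := by
  intro rest
  induction rest with
  | nil => intro pre s n X i h; simp [PySem.List.enumerate_nil, solLoop, firstsAux, sel_nil]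
  | cons a r ih =>
    intro pre s n X i h
    rw [PySem.List.enumerate_cons]
    by_cases hm : a ∈ pre
    · rw [solLoop, if_pos ((h a).mpr hm)]
      rw [firstsAux, if_pos hm]
      exact ih (pre ++ [a]) s n X (i + 1)
        (by intro x; rw [h x]; simp only [List.mem_append, List.mem_singleton]
            exact ⟨Or.inl, fun hx => hx.elim id (fun he => he ▸ hm)⟩)
    · rw [solLoop, if_neg (fun hx => hm ((h a).mp hx))]
      simp only []
      rw [firstsAux, if_neg hm]
      by_cases hX : n + 1 = X
      · rw [if_pos hX]
        have : X - n = 1 := by omega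
        rw [this, sel_cons_one]
      · rw [if_neg hX]
        rw [sel_cons_ne _ _ _ (by omega)]
        have : X - n - 1 = X - (n + 1) := by omega
        rw [this]
        exact ih (pre ++ [a]) (PySem.Set.add s a) (n + 1) X (i + 1)
          (by intro x; rw [PySem.Set.mem_add, h x]
              simp only [List.mem_append, List.mem_singleton])

theorem firstsAux_ge : ∀ (rest pre : List Int) (i x : Int), x ∈ firstsAux pre i rest → i ≤ x := by
  intro rest
  induction rest with
  | nil => intro pre i x hx; simp [firstsAux] at hx
  | cons a r ih =>
    intro pre i x hx
    rw [firstsAux] at hx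
    split at hx
    · have := ih (pre ++ [a]) (i + 1) x hx; omega
    · rcases List.mem_cons.mp hx with rfl | hx'
      · exact le_refl x
      · have := ih (pre ++ [a]) (i + 1) x hx'; omega

theorem firstsAux_pairwise : ∀ (rest pre : List Int) (i : Int),
    (firstsAux pre i rest).Pairwise (· ≤ ·) := by
  intro rest
  induction rest with
  | nil => intro pre i; simp [firstsAux]
  | cons a r ih =>
    intro pre i
    rw [firstsAux]
    split
    · exact ih (pre ++ [a]) (i + 1)
    · exact List.pairwise_cons.mpr
        ⟨fun x hx => by have := firstsAux_ge r (pre ++ [a]) (i + 1) x hx; omega,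
         ih (pre ++ [a]) (i + 1)⟩

theorem lemDict : ∀ (rest : List Int) (d : PySem.Dict Int Int) (pre : List Int) (i : Int),
    (∀ x : Int, d.contains x = true ↔ x ∈ pre) →
    ((PySem.List.enumerate rest i).foldl
        (fun d p => if d.contains p.2 then d else d.insert p.2 p.1) d).values
    = d.values ++ firstsAux pre i rest := by
  intro rest
  induction rest with
  | nil => intro d pre i h; simp [PySem.List.enumerate_nil, firstsAux]
  | cons a r ih =>
    intro d pre i h
    rw [PySem.List.enumerate_cons, List.foldl_cons]
    by_cases hm : a ∈ pre
    · have hc : d.contains a = true := (h a).mpr hm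
      simp only [hc, if_true]
      rw [firstsAux, if_pos hm]
      exact ih d (pre ++ [a]) (i + 1)
        (by intro x; rw [h x]; simp only [List.mem_append, List.mem_singleton]
            exact ⟨Or.inl, fun hx => hx.elim id (fun he => he ▸ hm)⟩)
    · have hc : d.contains a = false := by
        by_contra hcc
        exact hm ((h a).mp (by revert hcc; cases d.contains a <;> simp))
      simp only [hc, if_false, Bool.false_eq_true]
      rw [firstsAux, if_neg hm]
      have hrec := ih (d.insert a i) (pre ++ [a]) (i + 1)
        (by intro x
            rw [PySem.Dict.contains_insert]
            simp only [List.mem_append, List.mem_singleton, Bool.or_eq_true, beq_iff_eq]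
            rw [h x]; tauto)
      rw [hrec]
      have hv : (d.insert a i).values = d.values ++ [i] := by
        simp [PySem.Dict.values, PySem.Dict.items_insert, hc]
      rw [hv, List.append_assoc]
      rfl

theorem alt_eq_sel (X : Int) (A : List Int) :
    solution_alt X A = sel (firstsAux [] 0 A) X := by
  unfold solution_alt
  have h := lemDict A PySem.Dict.empty [] 0
    (by intro x; simp [PySem.Dict.contains_empty])
  have hemp : (PySem.Dict.empty : PySem.Dict Int Int).values = [] := by rfl
  simp only [h, hemp, List.nil_append]
  have hs : PySem.List.sorted (firstsAux [] 0 A) (fun x => x) false = firstsAux [] 0 A :=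
    PySem.List.sorted_eq_self_of_pairwise _ _ (firstsAux_pairwise A [] 0)
  rw [hs]
  simp only [sel]
  split
  · cases PySem.List.pyGet? (firstsAux [] 0 A) (X - 1) <;> rfl
  · rfl

-- ===== VERDICT (by name: the statement is the Claim_ definition above) =====
theorem solution_spec : Claim_equal_solution := by
  intro X A _
  unfold Spec_solution solution
  rw [alt_eq_sel]
  have := lemA A [] PySem.Set.empty 0 X 0 (by intro x; simp [PySem.Set.empty])
  simpa using this
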